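-- pv_equiv track=rewrite | github.com/AntoineGailrd/2026-Epita-Programmation-par-Contraintes | Groupe-J1-Allocation-multicritere-de-candidats/app/embedding_client.py | _tokens_match
-- ===== SOURCE A (Python) =====
-- def _tokens_match(left: str, right: str) -> bool:
--     if left == right:
--         return True
--     common_prefix_length = 0
--     for left_char, right_char in zip(left, right):
--         if left_char != right_char:
--             break
--         common_prefix_length += 1
--     return common_prefix_length >= 5
-- ===== SOURCE B (Python) =====
-- def _tokens_match(left: str, right: str) -> bool:
--     return left == right or (len(left) >= 5 and left[:5] == right[:5])
-- ===== Notes on version B (the rewrite author's own statement) =====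
-- stated objective: simpler
-- what changed: Replaces the char-by-char zip loop that counts the common prefix with a single expression: exact equality or direct comparison of the two length-5 slices (guarded by len(left) >= 5, which forces len(right) >= 5 when the slices match).
import Mathlib
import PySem

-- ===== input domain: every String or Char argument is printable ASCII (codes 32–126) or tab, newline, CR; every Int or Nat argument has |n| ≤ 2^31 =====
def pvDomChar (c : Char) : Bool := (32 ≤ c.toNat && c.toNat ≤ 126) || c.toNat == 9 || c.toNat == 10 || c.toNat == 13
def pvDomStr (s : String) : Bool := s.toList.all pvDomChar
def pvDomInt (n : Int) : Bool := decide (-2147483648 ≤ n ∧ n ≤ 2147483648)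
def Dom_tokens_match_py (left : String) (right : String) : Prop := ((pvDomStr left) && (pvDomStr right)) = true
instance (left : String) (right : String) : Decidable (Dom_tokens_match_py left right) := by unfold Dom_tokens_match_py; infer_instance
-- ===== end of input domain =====

-- B replaces A's char-by-char common-prefix counting loop with one expression:
-- exact equality or direct comparison of the two length-5 prefixes (objective: simpler).
-- Both ports work on .toList (code points), which is exact for string equality/zip/slicing.

-- ===== PORT A =====
-- A's `for left_char, right_char in zip(left, right): if != break; count += 1` loop
def pvPrefLoop (acc : Nat) : List (Char × Char) → Nat
  | [] => acc
  | (a, b) :: rest => if a ≠ b then acc else pvPrefLoop (acc + 1) rest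

def tokens_match_py (left : String) (right : String) : Bool :=
  if left.toList = right.toList then true
  else decide (5 ≤ pvPrefLoop 0 (left.toList.zip right.toList))

-- ===== PORT B =====
-- `left == right or (len(left) >= 5 and left[:5] == right[:5])`
def tokens_match_py_alt (left : String) (right : String) : Bool :=
  decide (left.toList = right.toList)
    || (decide (5 ≤ left.toList.length)
        && decide (PySem.List.slice left.toList none (some 5)
                   = PySem.List.slice right.toList none (some 5)))

-- ===== PRECONDITION & SPEC =====
def Spec_tokens_match_py (left : String) (right : String) (out : Bool) : Prop := out = tokens_match_py_alt left right
instance (left : String) (right : String) (out : Bool) : Decidable (Spec_tokens_match_py left right out) := by unfold Spec_tokens_match_py; infer_instance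

-- ===== CLAIM (what is proved, stated in full; the proofs are below) =====
def Claim_equal_tokens_match_py : Prop := ∀ (left : String) (right : String), Dom_tokens_match_py left right → Spec_tokens_match_py left right (tokens_match_py left right)

-- ===== LEMMAS AND PROOFS =====

theorem pvPrefLoop_nil (acc : Nat) : pvPrefLoop acc [] = acc := rfl

theorem pvPrefLoop_cons (acc : Nat) (a b : Char) (rest : List (Char × Char)) :
    pvPrefLoop acc ((a, b) :: rest) = if a ≠ b then acc else pvPrefLoop (acc + 1) rest := rfl

theorem pvPrefLoop_acc (acc : Nat) (ps : List (Char × Char)) :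
    pvPrefLoop acc ps = acc + pvPrefLoop 0 ps := by
  induction ps generalizing acc with
  | nil => simp [pvPrefLoop_nil]
  | cons p rest ih =>
    obtain ⟨a, b⟩ := p
    by_cases h : a = b
    · rw [pvPrefLoop_cons, pvPrefLoop_cons, if_neg (by simp [h]), if_neg (by simp [h]),
        ih (acc + 1), ih 1]
      omega
    · rw [pvPrefLoop_cons, pvPrefLoop_cons, if_pos (by simp [h]), if_pos (by simp [h])]
      omega

theorem pvPref_iff (n : Nat) (l r : List Char) :
    n ≤ pvPrefLoop 0 (l.zip r) ↔ (n ≤ l.length ∧ l.take n = r.take n) := by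
  induction l generalizing r n with
  | nil =>
    rw [show (([] : List Char).zip r) = [] from rfl, pvPrefLoop_nil]
    constructor
    · intro h
      have hn : n = 0 := by omega
      simp [hn]
    · intro h
      simpa using h.1
  | cons a l' ih =>
    cases r with
    | nil =>
      rw [show ((a :: l').zip ([] : List Char)) = [] from rfl, pvPrefLoop_nil]
      constructor
      · intro h
        have hn : n = 0 := by omega
        simp [hn]
      · intro h
        have := h.2
        cases n with
        | zero => omega
        | succ m => simp at this
    | cons b r' =>
      rw [show ((a :: l').zip (b :: r')) = (a, b) :: l'.zip r' from rfl, pvPrefLoop_cons]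
      by_cases hab : a = b
      · rw [if_neg (by simp [hab]), pvPrefLoop_acc]
        cases n with
        | zero => simp
        | succ m =>
          have ihm := ih m r'
          subst hab
          simp only [List.take_succ_cons, List.length_cons, List.cons.injEq, true_and]
          constructor
          · intro h
            have hm := ihm.mp (by omega)
            exact ⟨by omega, hm.2⟩
          · intro h
            have := ihm.mpr ⟨by omega, h.2⟩
            omega
      · rw [if_pos (by simp [hab])]
        cases n with
        | zero => simp
        | succ m => simp [List.take_succ_cons, hab]

theorem tokens_match_py_spec : Claim_equal_tokens_match_py := by
  unfold Claim_equal_tokens_match_py Spec_tokens_match_py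
  intro left right _
  unfold tokens_match_py tokens_match_py_alt
  rw [PySem.List.slice_to _ (by norm_num), PySem.List.slice_to _ (by norm_num)]
  by_cases heq : left.toList = right.toList
  · simp [heq]
  · simp only [heq, if_false, decide_eq_false heq, Bool.false_or]
    have hiff := pvPref_iff 5 left.toList right.toList
    rw [show (5 : Int).toNat = 5 from rfl]
    by_cases h : 5 ≤ pvPrefLoop 0 (left.toList.zip right.toList)
    · have h2 := hiff.mp h
      have hl : 5 ≤ left.length := by have := h2.1; simpa using this
      simp [h, hl, h2.2]
    · have h2 : ¬ (5 ≤ left.toList.length ∧ left.toList.take 5 = right.toList.take 5) :=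
        fun hc => h (hiff.mpr hc)
      by_cases hl : 5 ≤ left.toList.length
      · have hl' : 5 ≤ left.length := by simpa using hl
        have hne : ¬ left.toList.take 5 = right.toList.take 5 := fun hc => h2 ⟨hl, hc⟩
        simp [h, hl', hne]
      · have hl' : ¬ 5 ≤ left.length := by simpa using hl
        simp [h, hl']
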